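-- pv_equiv track=rewrite | github.com/RNAcentral/rnacentral-import-pipeline | luigi/databases/ensembl/helpers/bio.py | grouped_annotations
-- ===== SOURCE A (Python) =====
-- import collections as coll
--
-- def grouped_annotations(raw, split):
--     """
--     Parse a raw string into a dict. This will produce a key value mappign where
--     the key is everything before the first split and values is everything
--     after. The mapping values will be lists. This will correct RNACentral to
--     RNAcentral.
--     """
--     parsed = coll.defaultdict(set)
--     for entry in raw:
--         if split not in entry:
--             continue
--         key, value = entry.split(split, 1)
--         if key == 'RNACentral':
--             key = 'RNAcentral'
--         parsed[key].add(value)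
--     return {k: sorted(v) for k, v in parsed.items()}
-- ===== SOURCE B (Python) =====
-- def grouped_annotations(raw, split):
--     """Flatten to (key, value) pairs, then build each group by a per-key scan."""
--     pairs = []
--     for entry in raw:
--         if split in entry:
--             key, value = entry.split(split, 1)
--             pairs.append(('RNAcentral' if key == 'RNACentral' else key, value))
--     keys = dict.fromkeys(k for k, _ in pairs)
--     return {k: sorted({v for kk, v in pairs if kk == k}) for k in keys}
-- ===== Notes on version B (the rewrite author's own statement) =====
-- stated objective: alternative
-- what changed: Replaces A's one-pass defaultdict(set) grouping (incremental per-key set .add) by flattening to an explicit (key,value) pair list, ordered key dedup via dict.fromkeys, and building each group's sorted unique values by a per-key scan over the pair list.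
import Mathlib
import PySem

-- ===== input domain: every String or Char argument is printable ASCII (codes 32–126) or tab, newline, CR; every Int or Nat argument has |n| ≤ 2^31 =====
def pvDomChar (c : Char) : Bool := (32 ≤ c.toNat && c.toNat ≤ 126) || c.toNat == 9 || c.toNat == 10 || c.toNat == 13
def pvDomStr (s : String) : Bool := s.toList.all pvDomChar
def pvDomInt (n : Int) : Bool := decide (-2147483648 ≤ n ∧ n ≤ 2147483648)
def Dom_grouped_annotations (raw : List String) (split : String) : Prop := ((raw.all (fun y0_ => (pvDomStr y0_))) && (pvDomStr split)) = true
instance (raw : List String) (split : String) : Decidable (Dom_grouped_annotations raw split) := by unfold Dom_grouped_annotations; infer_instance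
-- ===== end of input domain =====

-- B replaces A's incremental defaultdict-of-sets grouping by a flat (key,value) pair list,
-- ordered key dedup, and a per-key scan (alternative decomposition, not claimed faster).


-- ===== PORT A =====
def grouped_annotations (raw : List String) (split : String) : List (String × List String) :=
  let parsed : PySem.Dict String (PySem.Set String) :=
    raw.foldl (fun d entry =>
      if PySem.Str.isIn split entry then
        match PySem.Str.splitMax? entry split 1 with
        | some (key :: value :: _) =>
          let key := if key = "RNACentral" then "RNAcentral" else key
          d.insert key (PySem.Set.add (d.getD key PySem.Set.empty) value)
        | _ => d   -- unreachable: split ≠ "" and split ∈ entry give exactly two pieces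
      else d) PySem.Dict.empty
  parsed.items.map (fun kv => (kv.1, PySem.List.sorted kv.2 (fun x => x) false))

-- ===== PORT B =====
def grouped_annotations_alt (raw : List String) (split : String) : List (String × List String) :=
  let pairs : List (String × String) :=
    raw.foldl (fun acc entry =>
      if PySem.Str.isIn split entry then
        match (PySem.Str.splitMax? entry split 1).getD [] with
        | [] => acc            -- unreachable, as in port A
        | [_] => acc           -- unreachable: split ∈ entry gives two pieces
        | key :: value :: _ =>
          acc ++ [((if key = "RNACentral" then "RNAcentral" else key), value)]
      else acc) []
  let keys := PySem.List.dedup (pairs.map (fun p => p.1))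
  keys.map (fun k => (k,
    PySem.List.sorted
      (PySem.Set.ofList ((pairs.filter (fun p => p.1 == k)).map (fun p => p.2)))
      (fun x => x) false))

-- ===== PRECONDITION & SPEC =====
-- Python's str.split raises ValueError on an empty separator, which A reaches whenever raw
-- is nonempty (since '' in entry is always True); Pre_ excludes exactly those raising inputs.
def Pre_grouped_annotations (raw : List String) (split : String) : Prop := split ≠ "" ∨ raw = []
instance (raw : List String) (split : String) : Decidable (Pre_grouped_annotations raw split) := by unfold Pre_grouped_annotations; infer_instance
def pvWitness_grouped_annotations : List String × String := (["a:b", "RNACentral:x", "a:b", "a:a"], ":")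

def Spec_grouped_annotations (raw : List String) (split : String) (out : List (String × List String)) : Prop := out = grouped_annotations_alt raw split
instance (raw : List String) (split : String) (out : List (String × List String)) : Decidable (Spec_grouped_annotations raw split out) := by unfold Spec_grouped_annotations; infer_instance

-- ===== CLAIM (what is proved, stated in full; the proofs are below) =====
def Claim_equal_grouped_annotations : Prop := ∀ (raw : List String) (split : String), Dom_grouped_annotations raw split → Pre_grouped_annotations raw split → Spec_grouped_annotations raw split (grouped_annotations raw split)

-- ===== LEMMAS AND PROOFS =====

-- A's dict step on one (key, value) pair
def gaStep (d : PySem.Dict String (PySem.Set String)) (p : String × String) : PySem.Dict String (PySem.Set String) :=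
  d.insert p.1 (PySem.Set.add (d.getD p.1 PySem.Set.empty) p.2)

-- the association list B's result is built from, as a function of the pair list
def gaAssoc (P : List (String × String)) : List (String × PySem.Set String) :=
  (PySem.List.dedup (P.map (fun p => p.1))).map (fun k =>
    (k, PySem.Set.ofList ((P.filter (fun p => p.1 == k)).map (fun p => p.2))))

theorem gaSet_ofList_concat (l : List String) (v : String) :
    PySem.Set.ofList (l ++ [v]) = PySem.Set.add (PySem.Set.ofList l) v := by
  simp [PySem.Set.ofList_eq_foldl]

theorem gaDedup_concat (xs : List String) (k : String) :
    PySem.List.dedup (xs ++ [k]) =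
      if k ∈ xs then PySem.List.dedup xs else PySem.List.dedup xs ++ [k] := by
  have h1 : PySem.List.dedup (xs ++ [k]) = PySem.Set.add (PySem.List.dedup xs) k := by
    simp [PySem.List.dedup_eq_ofList, PySem.Set.ofList_eq_foldl]
  rw [h1]
  simp only [PySem.Set.add, PySem.Set.contains]
  by_cases h : k ∈ xs <;>
    simp [h, PySem.List.dedup_eq_ofList, PySem.Set.mem_ofList]

theorem gaFold_items (P : List (String × String)) :
    (P.foldl gaStep PySem.Dict.empty).items = gaAssoc P := by
  induction P using List.reverseRecOn with
  | nil => rfl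
  | append_singleton P p ih =>
    rcases p with ⟨k, v⟩
    rw [List.foldl_append, List.foldl_cons, List.foldl_nil]
    have hkeys : (P.foldl gaStep PySem.Dict.empty).keys = PySem.List.dedup (P.map (fun p => p.1)) := by
      unfold PySem.Dict.keys
      rw [ih]; unfold gaAssoc; rw [List.map_map]; simp [Function.comp_def]
    have hnd : (P.foldl gaStep PySem.Dict.empty).keys.Nodup := by
      rw [hkeys, PySem.List.dedup_eq_ofList]; exact PySem.Set.nodup_ofList _
    show ((List.foldl gaStep PySem.Dict.empty P).insert k
        (((List.foldl gaStep PySem.Dict.empty P).getD k PySem.Set.empty).add v)).items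
      = gaAssoc (P ++ [(k, v)])
    by_cases hmem : k ∈ P.map (fun p => p.1)
    · have hc : (P.foldl gaStep PySem.Dict.empty).contains k = true := by
        rw [PySem.Dict.contains_eq_decide_mem_keys, hkeys]
        simp [PySem.List.dedup_eq_ofList, PySem.Set.mem_ofList, hmem]
      have hval : (P.foldl gaStep PySem.Dict.empty).getD k PySem.Set.empty
          = PySem.Set.ofList ((P.filter (fun p => p.1 == k)).map (fun p => p.2)) := by
        apply PySem.Dict.getD_of_mem_items _ _ hnd
        rw [ih]; unfold gaAssoc
        exact List.mem_map_of_mem (by simp [PySem.List.dedup_eq_ofList, PySem.Set.mem_ofList, hmem])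
      rw [PySem.Dict.items_insert_of_contains _ _ hc, ih, hval]
      unfold gaAssoc
      have hm : List.map (fun p => (p : String × String).1) (P ++ [(k, v)])
          = List.map (fun p => p.1) P ++ [k] := by simp
      rw [List.map_map, hm, gaDedup_concat, if_pos hmem]
      apply List.map_congr_left
      intro a ha
      have ha' : a ∈ P.map (fun p => p.1) := by
        rw [PySem.List.dedup_eq_ofList] at ha; exact (PySem.Set.mem_ofList _ _).mp ha
      by_cases hak : a = k
      · subst hak
        simp [List.filter_append, gaSet_ofList_concat]
      · have h1 : (a == k) = false := by simp [hak]
        have h2 : (k == a) = false := by simp [Ne.symm hak]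
        simp [List.filter_append, h2]
        exact fun h => absurd h hak
    · have hc : (P.foldl gaStep PySem.Dict.empty).contains k = false := by
        rw [PySem.Dict.contains_eq_decide_mem_keys, hkeys]
        simp [PySem.List.dedup_eq_ofList, PySem.Set.mem_ofList, hmem]
      have hval : (P.foldl gaStep PySem.Dict.empty).getD k PySem.Set.empty = PySem.Set.empty :=
        PySem.Dict.getD_of_not_contains _ _ hc
      have hfilter : P.filter (fun p => p.1 == k) = [] := by
        apply List.filter_eq_nil_iff.mpr
        intro p hp hpk
        exact hmem (eq_of_beq hpk ▸ List.mem_map_of_mem hp)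
      rw [PySem.Dict.items_insert_of_not_contains _ _ hc, ih, hval]
      unfold gaAssoc
      have hm : List.map (fun p => (p : String × String).1) (P ++ [(k, v)])
          = List.map (fun p => p.1) P ++ [k] := by simp
      rw [hm, gaDedup_concat, if_neg hmem, List.map_append]
      congr 1
      · apply List.map_congr_left
        intro a ha
        have ha' : a ∈ P.map (fun p => p.1) := by
          rw [PySem.List.dedup_eq_ofList] at ha; exact (PySem.Set.mem_ofList _ _).mp ha
        have hak : a ≠ k := fun h => hmem (h ▸ ha')
        have h2 : (k == a) = false := by simp [Ne.symm hak]
        simp [List.filter_append, h2]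
      · simp [hfilter, PySem.Set.ofList_eq_foldl, PySem.Set.add, PySem.Set.contains, PySem.Set.empty]

theorem gaFold_eq (raw : List String) (split : String) :
    ∀ (acc : List (String × String)),
      raw.foldl (fun d entry =>
        if PySem.Str.isIn split entry then
          match PySem.Str.splitMax? entry split 1 with
          | some (key :: value :: _) =>
            let key := if key = "RNACentral" then "RNAcentral" else key
            d.insert key (PySem.Set.add (d.getD key PySem.Set.empty) value)
          | _ => d
        else d) (acc.foldl gaStep PySem.Dict.empty)
      = (raw.foldl (fun acc entry =>
          if PySem.Str.isIn split entry then
            match (PySem.Str.splitMax? entry split 1).getD [] with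
            | [] => acc
            | [_] => acc
            | key :: value :: _ =>
              acc ++ [((if key = "RNACentral" then "RNAcentral" else key), value)]
          else acc) acc).foldl gaStep PySem.Dict.empty := by
  induction raw with
  | nil => intro acc; simp
  | cons e rest ih =>
    intro acc
    simp only [List.foldl_cons]
    by_cases h : PySem.Str.isIn split e = true
    · rw [if_pos h, if_pos h]
      rcases hs : PySem.Str.splitMax? e split 1 with _ | l
      · exact ih acc
      · simp only [Option.getD_some]
        match l with
        | [] => exact ih acc
        | [k] => exact ih acc
        | k :: v :: t =>
          have h2 := ih (acc ++ [((if k = "RNACentral" then "RNAcentral" else k), v)])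
          simpa [gaStep, List.foldl_append] using h2
    · rw [if_neg h]
      rw [if_neg h]
      exact ih acc

-- ===== VERDICT (by name: the statement is the Claim_ definition above) =====
theorem grouped_annotations_spec : Claim_equal_grouped_annotations := by
  intro raw split _ _
  unfold Spec_grouped_annotations grouped_annotations grouped_annotations_alt
  have h := gaFold_eq raw split []
  simp only [List.foldl_nil] at h
  rw [h]
  simp only [gaFold_items, gaAssoc, List.map_map]
  rfl
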